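-- pv_equiv track=rewrite | github.com/RaniaDjem/SAFEOOD_stageCODE | 3.Final/app.py | find_text_with_most_lines
-- ===== SOURCE A (Python) =====
-- def count_lines(text):
--     return len(text.split('\n'))
--
-- def find_text_with_most_lines(texts):
--     lines_counts = [count_lines(text) for text in texts]
--     max_lines = max(lines_counts)
--     texts_with_max_lines = [text for text, count in zip(texts, lines_counts) if count == max_lines]
--
--     if len(texts_with_max_lines) == 1:
--         return texts_with_max_lines[0]
--     else:
--         max_chars = max(len(text) for text in texts_with_max_lines)
--         return next(text for text in texts_with_max_lines if len(text) == max_chars)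
-- ===== SOURCE B (Python) =====
-- def count_lines(text):
--     return len(text.split('\n'))
--
-- def find_text_with_most_lines(texts):
--     return max(texts, key=lambda t: (count_lines(t), len(t)))
-- ===== Notes on version B (the rewrite author's own statement) =====
-- stated objective: simpler
-- what changed: Replaces the multi-pass body (count list, max, filter to the tied texts, second max over lengths, linear scan) with a single max() over a composite (line_count, length) key, whose first-maximal tie-breaking reproduces A's choice.
import Mathlib
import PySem

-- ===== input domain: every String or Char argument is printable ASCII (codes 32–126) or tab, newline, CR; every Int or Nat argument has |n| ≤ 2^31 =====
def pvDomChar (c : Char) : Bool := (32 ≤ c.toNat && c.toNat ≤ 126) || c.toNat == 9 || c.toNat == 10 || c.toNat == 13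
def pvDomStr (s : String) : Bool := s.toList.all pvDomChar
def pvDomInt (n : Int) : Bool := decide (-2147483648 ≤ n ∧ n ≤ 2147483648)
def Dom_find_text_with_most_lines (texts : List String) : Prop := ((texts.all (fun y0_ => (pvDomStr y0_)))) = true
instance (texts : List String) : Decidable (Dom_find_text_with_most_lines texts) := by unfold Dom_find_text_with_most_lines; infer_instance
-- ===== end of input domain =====

-- B is a simpler decomposition of A (one max() with a composite (line_count, length) key instead
-- of five passes); equal return value on every nonempty list, both Pythons raise ValueError on [].

-- ===== PORT A =====
def count_lines (text : String) : Int :=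
  PySem.List.len ((PySem.Str.split? text "\n").getD [])

def find_text_with_most_lines (texts : List String) : String :=
  let lines_counts := texts.map count_lines
  match PySem.List.max? lines_counts (fun x => x) with
  | none => ""  -- max([]) raises ValueError in Python; excluded by Pre_
  | some max_lines =>
    let texts_with_max_lines :=
      ((texts.zip lines_counts).filter (fun p => p.2 == max_lines)).map Prod.fst
    if texts_with_max_lines.length == 1 then
      texts_with_max_lines.headD ""
    else
      match PySem.List.max? (texts_with_max_lines.map PySem.Str.len) (fun x => x) with
      | none => ""  -- unreachable for nonempty texts
      | some max_chars =>
        (texts_with_max_lines.find? (fun t => PySem.Str.len t == max_chars)).getD ""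

-- ===== PORT B =====
def count_lines_alt (text : String) : Int :=
  PySem.List.len ((PySem.Str.split? text "\n").getD [])

def find_text_with_most_lines_alt (texts : List String) : String :=
  (PySem.List.max2? texts count_lines_alt PySem.Str.len).getD ""

-- ===== PRECONDITION & SPEC =====
-- Pre_ excludes only the empty list, on which both Pythons raise ValueError (max of empty sequence).
def Pre_find_text_with_most_lines (texts : List String) : Prop := texts ≠ []
instance (texts : List String) : Decidable (Pre_find_text_with_most_lines texts) := by
  unfold Pre_find_text_with_most_lines; infer_instance

def pvWitness_find_text_with_most_lines : List String := ["a\nb", "cd"]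

def Spec_find_text_with_most_lines (texts : List String) (out : String) : Prop := out = find_text_with_most_lines_alt texts
instance (texts : List String) (out : String) : Decidable (Spec_find_text_with_most_lines texts out) := by unfold Spec_find_text_with_most_lines; infer_instance

-- ===== CLAIM (what is proved, stated in full; the proofs are below) =====
def Claim_equal_find_text_with_most_lines : Prop := ∀ (texts : List String), Dom_find_text_with_most_lines texts → Pre_find_text_with_most_lines texts → Spec_find_text_with_most_lines texts (find_text_with_most_lines texts)

-- ===== LEMMAS AND PROOFS =====

-- the composite key both implementations maximise
def pvKey (t : String) : Int × Int := (count_lines t, PySem.Str.len t)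

-- Python's lexicographic strict order on Int pairs
def pvKlt (a b : Int × Int) : Prop := a.1 < b.1 ∨ (a.1 = b.1 ∧ a.2 < b.2)

def pvKltb (a b : Int × Int) : Bool := a.1 < b.1 || (a.1 == b.1 && a.2 < b.2)

theorem pvKltb_iff {a b : Int × Int} : pvKltb a b = true ↔ pvKlt a b := by
  unfold pvKltb pvKlt
  simp only [Bool.or_eq_true, Bool.and_eq_true, decide_eq_true_eq, beq_iff_eq]

theorem pvKlt_trichotomy (a b : Int × Int) : pvKlt a b ∨ a = b ∨ pvKlt b a := by
  unfold pvKlt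
  rcases a with ⟨a1, a2⟩; rcases b with ⟨b1, b2⟩
  simp only [Prod.mk.injEq]
  omega

theorem pvKlt_asymm {a b : Int × Int} (h : pvKlt a b) (h' : pvKlt b a) : False := by
  unfold pvKlt at h h'; omega

theorem pvKlt_trans {a b c : Int × Int} (h : pvKlt a b) (h' : pvKlt b c) : pvKlt a c := by
  unfold pvKlt at *; omega

-- "m is the FIRST lexicographically maximal element of xs"
def pvIsFirstMax (xs : List String) (m : String) : Prop :=
  (∀ y ∈ xs, ¬ pvKlt (pvKey m) (pvKey y)) ∧
  ∃ i : Nat, ∃ h : i < xs.length, xs[i] = m ∧ ∀ y ∈ xs.take i, pvKlt (pvKey y) (pvKey m)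

theorem pvIsFirstMax_unique {xs : List String} {m m' : String}
    (h : pvIsFirstMax xs m) (h' : pvIsFirstMax xs m') : m = m' := by
  obtain ⟨hmax, i, hi, hei, hfst⟩ := h
  obtain ⟨hmax', i', hi', hei', hfst'⟩ := h'
  rcases lt_trichotomy i i' with hlt | heq | hgt
  · exfalso
    have hlen : i < (xs.take i').length := by
      simp only [List.length_take]; omega
    have hm : m ∈ xs.take i' := by
      have hgt' : (xs.take i')[i] = xs[i] := List.getElem_take
      rw [← hei, ← hgt']
      exact List.getElem_mem hlen
    exact hmax m' (hei' ▸ List.getElem_mem hi') (hfst' m hm)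
  · subst heq; rw [← hei, ← hei']
  · exfalso
    have hlen : i' < (xs.take i).length := by
      simp only [List.length_take]; omega
    have hm : m' ∈ xs.take i := by
      have hgt' : (xs.take i)[i'] = xs[i'] := List.getElem_take
      rw [← hei', ← hgt']
      exact List.getElem_mem hlen
    exact hmax' m (hei ▸ List.getElem_mem hi) (hfst m' hm)

theorem count_lines_alt_eq : count_lines_alt = count_lines := rfl

-- ---- B side: max2? of a nonempty list is the first lexicographic maximum ----

theorem foldl_max2_first_max : ∀ (xs : List String) (m : String),
    pvIsFirstMax (m :: xs)
      (xs.foldl (fun a y => if pvKltb (pvKey a) (pvKey y) then y else a) m) := by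
  intro xs
  induction xs with
  | nil =>
    intro m
    refine ⟨?_, 0, by simp, rfl, by simp⟩
    intro y hy
    simp only [List.foldl_nil, List.mem_singleton] at hy ⊢
    subst hy
    exact fun h => pvKlt_asymm h h
  | cons x xs ih =>
    intro m
    simp only [List.foldl_cons]
    by_cases hx : pvKlt (pvKey m) (pvKey x)
    · rw [if_pos (pvKltb_iff.2 hx)]
      obtain ⟨hmax, i, hi, hei, hfst⟩ := ih x
      refine ⟨?_, i + 1, by simpa using hi, by simpa using hei, ?_⟩
      · intro y hy
        rcases List.mem_cons.1 hy with rfl | hy'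
        · exact fun hk => hmax x List.mem_cons_self (pvKlt_trans hk hx)
        · exact hmax y hy'
      · intro y hy
        rw [List.take_succ_cons] at hy
        rcases List.mem_cons.1 hy with rfl | hy'
        · -- y = m, show pvKlt (pvKey m) (pvKey r) where r is i-th of (x :: xs)
          rcases Nat.eq_zero_or_pos i with rfl | hpos
          · simp only [List.getElem_cons_zero] at hei
            exact hei ▸ hx
          · have hxr : pvKlt (pvKey x) _ := hfst x (by
              obtain ⟨j, rfl⟩ : ∃ j, i = j + 1 := ⟨i - 1, by omega⟩
              rw [List.take_succ_cons]
              exact List.mem_cons_self)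
            exact pvKlt_trans hx hxr
        · exact hfst y hy'
    · rw [if_neg (fun hc => hx (pvKltb_iff.1 hc))]
      obtain ⟨hmax, i, hi, hei, hfst⟩ := ih m
      have hxm : pvKlt (pvKey x) (pvKey m) ∨ pvKey x = pvKey m := by
        rcases pvKlt_trichotomy (pvKey x) (pvKey m) with h | h | h
        · exact Or.inl h
        · exact Or.inr h
        · exact absurd h hx
      have hmaxm := hmax m List.mem_cons_self
      refine ⟨?_, ?_⟩
      · intro y hy
        rcases List.mem_cons.1 hy with rfl | hy'
        · exact hmaxm
        · rcases List.mem_cons.1 hy' with rfl | hy''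
          · intro hk
            rcases hxm with h | h
            · exact hmaxm (pvKlt_trans hk h)
            · rw [h] at hk; exact hmaxm hk
          · exact hmax y (List.mem_cons_of_mem _ hy'')
      · rcases Nat.eq_zero_or_pos i with rfl | hpos
        · simp only [List.getElem_cons_zero] at hei
          exact ⟨0, by simp, by simpa using hei, by simp⟩
        · obtain ⟨j, rfl⟩ : ∃ j, i = j + 1 := ⟨i - 1, by omega⟩
          simp only [List.getElem_cons_succ] at hei
          refine ⟨j + 2, by simpa using hi, by simpa using hei, ?_⟩
          have hm_lt : pvKlt (pvKey m) _ := hfst m (by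
            rw [List.take_succ_cons]; exact List.mem_cons_self)
          intro y hy
          rw [List.take_succ_cons] at hy
          rcases List.mem_cons.1 hy with rfl | hy'
          · exact hm_lt
          · rw [List.take_succ_cons] at hy'
            rcases List.mem_cons.1 hy' with rfl | hy''
            · rcases hxm with h | h
              · exact pvKlt_trans h hm_lt
              · rw [h]; exact hm_lt
            · exact hfst y (by rw [List.take_succ_cons]; exact List.mem_cons_of_mem _ hy'')

theorem max2?_eq : ∀ (l : List String) (m : String),
    PySem.List.max2? (m :: l) count_lines_alt PySem.Str.len =
      some (l.foldl (fun a y => if pvKltb (pvKey a) (pvKey y) then y else a) m) := by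
  intro l
  induction l with
  | nil => intro m; rfl
  | cons y l ih =>
    intro m
    have ihy := ih y
    have ihm := ih m
    unfold PySem.List.max2? at ihy ihm ⊢
    simp only [List.foldl_cons] at ihy ihm ⊢
    have hcond : (decide (count_lines_alt m < count_lines_alt y) ||
        (!decide (count_lines_alt y < count_lines_alt m) &&
         decide (PySem.Str.len m < PySem.Str.len y))) = true ↔ pvKlt (pvKey m) (pvKey y) := by
      simp only [Bool.or_eq_true, Bool.and_eq_true, Bool.not_eq_true', decide_eq_true_eq,
        decide_eq_false_iff_not, pvKlt, pvKey, count_lines_alt_eq]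
      omega
    by_cases h : pvKlt (pvKey m) (pvKey y)
    · rw [if_pos (hcond.2 h), if_pos (pvKltb_iff.2 h)]
      exact ihy
    · rw [if_neg (fun hc => h (hcond.1 hc)), if_neg (fun hc => h (pvKltb_iff.1 hc))]
      exact ihm

theorem alt_first_max (x : String) (xs : List String) :
    pvIsFirstMax (x :: xs) (find_text_with_most_lines_alt (x :: xs)) := by
  have h1 : find_text_with_most_lines_alt (x :: xs) =
      xs.foldl (fun a y => if pvKltb (pvKey a) (pvKey y) then y else a) x := by
    unfold find_text_with_most_lines_alt
    rw [max2?_eq xs x]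
    rfl
  rw [h1]
  exact foldl_max2_first_max xs x

-- ---- A side: the returned value is the first lexicographic maximum too ----

theorem zip_map_filter (L : Int) : ∀ (xs : List String),
    (((xs.zip (xs.map count_lines)).filter (fun p => p.2 == L)).map Prod.fst) =
    xs.filter (fun t => count_lines t == L) := by
  intro xs
  induction xs with
  | nil => rfl
  | cons x xs ih =>
    simp only [List.map_cons, List.zip_cons_cons, List.filter_cons]
    by_cases h : count_lines x == L
    · simp [h, ih]
    · simp [h, ih]

theorem find?_filter (p q : String → Bool) : ∀ (xs : List String),
    (xs.filter p).find? q = xs.find? (fun t => p t && q t) := by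
  intro xs
  induction xs with
  | nil => rfl
  | cons x xs ih =>
    by_cases hp : p x
    · by_cases hq : q x
      · simp [hp, hq]
      · simp only [Bool.not_eq_true] at hq
        simp [hp, hq, ih]
    · simp only [Bool.not_eq_true] at hp
      simp [hp, ih]

theorem max?_id_spec (xs : List Int) (hx : xs ≠ []) :
    ∃ M, PySem.List.max? xs (fun x => x) = some M ∧ M ∈ xs ∧ ∀ y ∈ xs, y ≤ M := by
  cases h : PySem.List.max? xs (fun x => x) with
  | none => exact absurd ((PySem.List.max?_eq_none_iff _ _).1 h) hx
  | some M =>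
    exact ⟨M, rfl, PySem.List.max?_mem h, fun y hy => PySem.List.max?_isMax h y hy⟩

theorem find?_char : ∀ (xs : List String) (p : String → Bool) (f : String),
    xs.find? p = some f →
    p f = true ∧ ∃ i : Nat, ∃ h : i < xs.length, xs[i] = f ∧ ∀ y ∈ xs.take i, p y = false := by
  intro xs
  induction xs with
  | nil => intro p f hf; simp at hf
  | cons x xs ih =>
    intro p f hf
    by_cases hx : p x
    · rw [List.find?_cons_of_pos hx] at hf
      obtain rfl : x = f := by simpa using hf
      exact ⟨hx, 0, by simp, rfl, by simp⟩
    · rw [List.find?_cons_of_neg (by simpa using hx)] at hf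
      obtain ⟨hpf, i, hi, hei, hbef⟩ := ih p f hf
      refine ⟨hpf, i + 1, by simpa using hi, by simpa using hei, ?_⟩
      intro y hy
      rw [List.take_succ_cons] at hy
      rcases List.mem_cons.1 hy with rfl | hy'
      · simpa using hx
      · exact hbef y hy'

theorem find?_first_max_aux (L C : Int) (xs : List String)
    (hL : ∀ y ∈ xs, count_lines y ≤ L)
    (hC : ∀ y ∈ xs, count_lines y = L → PySem.Str.len y ≤ C)
    {f : String} (hf : xs.find? (fun t => (count_lines t == L) && (PySem.Str.len t == C)) = some f) :
    pvIsFirstMax xs f := by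
  obtain ⟨hpf, i, hi, hei, hbef⟩ := find?_char xs _ f hf
  have hfLC : count_lines f = L ∧ PySem.Str.len f = C := by
    simpa using hpf
  constructor
  · intro y hy hk
    have h1 := hL y hy
    by_cases hyL : count_lines y = L
    · have h2 := hC y hy hyL
      simp only [pvKlt, pvKey] at hk
      omega
    · simp only [pvKlt, pvKey] at hk
      omega
  · refine ⟨i, hi, hei, ?_⟩
    intro y hy
    have hyx : y ∈ xs := List.take_subset i xs hy
    have h1 := hL y hyx
    have hb : ¬ (count_lines y = L ∧ PySem.Str.len y = C) := by
      have := hbef y hy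
      simpa using this
    by_cases hyL : count_lines y = L
    · have h2 := hC y hyx hyL
      simp only [pvKlt, pvKey]
      omega
    · simp only [pvKlt, pvKey]
      omega

theorem a_first_max (x : String) (xs : List String) :
    pvIsFirstMax (x :: xs) (find_text_with_most_lines (x :: xs)) := by
  obtain ⟨L, hLmax, hLmem, hLub⟩ := max?_id_spec ((x :: xs).map count_lines) (by simp)
  have hLub' : ∀ y ∈ (x :: xs), count_lines y ≤ L := fun y hy => hLub _ (List.mem_map_of_mem hy)
  have hfilt := zip_map_filter L (x :: xs)
  have hfe : (x :: xs).filter (fun t => count_lines t == L) ≠ [] := by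
    obtain ⟨t, ht, hteq⟩ := List.mem_map.1 hLmem
    intro hnil
    have htf : t ∈ (x :: xs).filter (fun t => count_lines t == L) :=
      List.mem_filter.2 ⟨ht, beq_iff_eq.mpr hteq⟩
    rw [hnil] at htf
    exact absurd htf (List.not_mem_nil)
  obtain ⟨C, hCmax, hCmem, hCub⟩ :=
    max?_id_spec (((x :: xs).filter (fun t => count_lines t == L)).map PySem.Str.len)
      (fun h => hfe (List.map_eq_nil_iff.1 h))
  have hCub' : ∀ y ∈ (x :: xs), count_lines y = L → PySem.Str.len y ≤ C := fun y hy hyL =>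
    hCub _ (List.mem_map_of_mem (List.mem_filter.2 ⟨hy, beq_iff_eq.mpr hyL⟩))
  have hfind : ∃ f, ((x :: xs).filter (fun t => count_lines t == L)).find?
      (fun t => PySem.Str.len t == C) = some f := by
    obtain ⟨t, ht, hteq⟩ := List.mem_map.1 hCmem
    cases h : ((x :: xs).filter (fun t => count_lines t == L)).find?
        (fun t => PySem.Str.len t == C) with
    | none => exact absurd (List.find?_eq_none.1 h t ht) (fun hn => hn (beq_iff_eq.mpr hteq))
    | some f => exact ⟨f, rfl⟩
  obtain ⟨f, hf⟩ := hfind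
  have hff : (x :: xs).find? (fun t => (count_lines t == L) && (PySem.Str.len t == C)) = some f := by
    rw [← find?_filter (fun t => count_lines t == L) (fun t => PySem.Str.len t == C) (x :: xs)]
    exact hf
  have hmain := find?_first_max_aux L C (x :: xs) hLub' hCub' hff
  unfold find_text_with_most_lines
  simp only [hLmax, hfilt]
  by_cases h1 : ((x :: xs).filter (fun t => count_lines t == L)).length = 1
  · rw [if_pos (by simpa using h1)]
    obtain ⟨t, hft⟩ := List.length_eq_one_iff.1 h1
    have hfteq : f = t := by
      have hmem := List.mem_of_find?_eq_some hf
      rw [hft] at hmem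
      simpa using hmem
    rw [hft]
    simpa [hfteq] using hmain
  · rw [if_neg (by simpa using h1)]
    simp only [hCmax, hf, Option.getD_some]
    exact hmain

-- ===== VERDICT (by name: the statement is the Claim_ definition above) =====
theorem find_text_with_most_lines_spec : Claim_equal_find_text_with_most_lines := by
  intro texts _ hpre
  unfold Spec_find_text_with_most_lines
  cases texts with
  | nil => exact absurd rfl hpre
  | cons x xs =>
    exact pvIsFirstMax_unique (a_first_max x xs) (alt_first_max x xs)
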